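-- pv_equiv track=rewrite | github.com/niracler/python-exercise | interview_question/interview_question.py | quest3
-- ===== SOURCE A (Python) =====
-- def quest3(word):
--     i = 0
--     while i < len(word):
--         double_word = word[i] + word[i]
--         j = i + 1
--         while j < len(word):
--             if len(word[i]) == len(word[j]) and word[j] in double_word:
--                 del word[j]
--             else:
--                 j = j + 1
--         i = i + 1
--     return len(word)
-- ===== SOURCE B (Python) =====
-- def quest3(word):
--     # Canonical minimal rotation per string, collected in a set; count distinct.
--     # (Unlike A, this does not mutate the caller's list.)
--     seen = set()
--     for s in word:
--         seen.add(min(s[i:] + s[:i] for i in range(len(s))) if s else "")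
--     return len(seen)
-- ===== Notes on version B (the rewrite author's own statement) =====
-- stated objective: faster
-- what changed: Replaces the quadratic pairwise delete-duplicates-in-place scan by computing a canonical minimal rotation for each string and counting distinct canonical forms in a hash set (one pass; A's in-place mutation of the input list is not reproduced).
import Mathlib
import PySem

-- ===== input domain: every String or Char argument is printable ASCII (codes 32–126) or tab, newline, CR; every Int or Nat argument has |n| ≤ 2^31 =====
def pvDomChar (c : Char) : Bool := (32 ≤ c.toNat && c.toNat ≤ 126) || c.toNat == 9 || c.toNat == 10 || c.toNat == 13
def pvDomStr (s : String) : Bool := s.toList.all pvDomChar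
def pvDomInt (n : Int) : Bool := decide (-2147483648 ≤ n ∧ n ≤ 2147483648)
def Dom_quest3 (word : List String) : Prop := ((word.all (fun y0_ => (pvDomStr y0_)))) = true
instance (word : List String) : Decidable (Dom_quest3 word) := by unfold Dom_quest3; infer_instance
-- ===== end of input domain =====

-- B replaces A's quadratic pairwise delete-in-place scan by one pass that collects each
-- string's minimal rotation in a set; equivalence is about the RETURN value only
-- (Python A mutates its argument list in place, B does not).

-- ===== PORT A =====
-- inner while loop: scan positions j > i, deleting word[j] when it has the same length
-- as word[i] and occurs in word[i]+word[i]; ported structurally on .toList char lists.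
def quest3Inner (w : List Char) (dw : List Char) : List (List Char) → List (List Char)
  | [] => []
  | y :: ys =>
      if w.length = y.length ∧ PySem.Chars.isIn y dw = true then quest3Inner w dw ys
      else y :: quest3Inner w dw ys

-- needed by quest3Outer's decreasing_by
theorem quest3Inner_length_le (w dw : List Char) (l : List (List Char)) :
    (quest3Inner w dw l).length ≤ l.length := by
  induction l with
  | nil => simp [quest3Inner]
  | cons y ys ih => simp only [quest3Inner]; split <;> simp <;> omega

-- outer while loop: each surviving word[i] contributes 1 to the final len(word)
def quest3Outer : List (List Char) → Nat
  | [] => 0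
  | x :: xs => 1 + quest3Outer (quest3Inner x (x ++ x) xs)
termination_by l => l.length
decreasing_by
  have := quest3Inner_length_le x (x ++ x) xs; simp; omega

def quest3 (word : List String) : Int :=
  (quest3Outer (word.map String.toList) : Int)

-- ===== PORT B =====
-- the rotations s[i:] + s[:i] for i in range(len(s))
def quest3Rots (s : List Char) : List (List Char) :=
  (PySem.List.pyRange 0 (s.length : Int) 1).map
    (fun i => PySem.List.slice s (some i) none ++ PySem.List.slice s none (some i))

-- min(...) if s else ""
def quest3Canon (s : List Char) : List Char :=
  if s = [] then [] else (PySem.List.min? (quest3Rots s) (fun r => r)).getD []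

def quest3_alt (word : List String) : Int :=
  ((PySem.Set.ofList (word.map (fun w => quest3Canon w.toList))).length : Int)

-- ===== PRECONDITION & SPEC =====
def Spec_quest3 (word : List String) (out : Int) : Prop := out = quest3_alt word
instance (word : List String) (out : Int) : Decidable (Spec_quest3 word out) := by unfold Spec_quest3; infer_instance

-- ===== CLAIM (what is proved, stated in full; the proofs are below) =====
def Claim_equal_quest3 : Prop := ∀ (word : List String), Dom_quest3 word → Spec_quest3 word (quest3 word)

-- ===== LEMMAS AND PROOFS =====

-- A's test "same length and substring of the doubled word" is exactly rotation equivalence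
theorem quest3_cond_iff_isRotated (x y : List Char) :
    (x.length = y.length ∧ PySem.Chars.isIn y (x ++ x) = true) ↔ x ~r y := by
  rw [PySem.Chars.isIn_iff_infix]
  constructor
  · rintro ⟨hlen, s, t, hst⟩
    have hs : s.length ≤ x.length := by
      have := congrArg List.length hst; simp at this; omega
    refine ⟨s.length, ?_⟩
    have h1 : List.drop s.length (x ++ x) = y ++ t := by
      rw [← hst, List.append_assoc, List.drop_left]
    rw [List.drop_append, Nat.sub_eq_zero_of_le hs, List.drop_zero] at h1
    have h2 : List.take x.length (List.drop s.length x ++ x) = y := by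
      rw [h1, hlen, List.take_left]
    have heq : x.length - (x.length - s.length) = s.length := by omega
    rw [List.take_append, List.take_of_length_le (by simp), List.length_drop, heq] at h2
    rw [List.rotate_eq_drop_append_take hs, h2]
  · rintro ⟨n, rfl⟩
    rcases eq_or_ne x [] with rfl | hx
    · simp
    · have hpos : 0 < x.length := List.length_pos_iff.mpr hx
      refine ⟨by simp, List.take (n % x.length) x, List.drop (n % x.length) x, ?_⟩
      rw [← List.rotate_mod, List.rotate_eq_drop_append_take (Nat.mod_lt n hpos).le]
      simp only [← List.append_assoc, List.take_append_drop]
      rw [List.append_assoc, List.take_append_drop]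

-- B's rotation list is the list of all rotations
theorem quest3Rots_eq (s : List Char) :
    quest3Rots s = (List.range s.length).map (fun k => s.rotate k) := by
  unfold quest3Rots
  rw [PySem.List.pyRange_one]
  simp only [List.map_map, Int.sub_zero, Int.toNat_natCast]
  apply List.map_congr_left
  intro k hk
  rw [List.mem_range] at hk
  simp only [Function.comp, zero_add, PySem.List.slice_from_natCast, PySem.List.slice_to_natCast,
    List.rotate_eq_drop_append_take hk.le]

theorem mem_quest3Rots (s z : List Char) (hs : s ≠ []) :
    z ∈ quest3Rots s ↔ s ~r z := by
  have hpos : 0 < s.length := List.length_pos_iff.mpr hs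
  rw [quest3Rots_eq]
  simp only [List.mem_map, List.mem_range]
  constructor
  · rintro ⟨k, _, rfl⟩; exact ⟨k, rfl⟩
  · rintro ⟨n, rfl⟩
    exact ⟨n % s.length, Nat.mod_lt n hpos, List.rotate_mod s n⟩

theorem quest3Rots_ne_nil (s : List Char) (hs : s ≠ []) : quest3Rots s ≠ [] := by
  have hpos : 0 < s.length := List.length_pos_iff.mpr hs
  rw [quest3Rots_eq]
  simp [List.range_eq_nil]
  omega

-- bridge between the Decidable/LT instances the port elaborated with and Mathlib's
-- LinearOrder instances that PySem.List.min?_isMin is stated for (they are defeq)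
theorem quest3_min?_eq (xs : List (List Char)) :
    (@PySem.List.min? (List Char) (List Char) List.instLT (fun a b => a.decidableLT b) xs fun r => r)
    = (@PySem.List.min? (List Char) (List Char) List.instLinearOrder.toLT
        LinearOrder.toDecidableLT xs fun r => r) := by
  congr 1

theorem quest3_min?_isMin (xs : List (List Char)) (m : List Char)
    (hm : PySem.List.min? xs (fun r => r) = some m) : ∀ y ∈ xs, m ≤ y := by
  rw [quest3_min?_eq xs] at hm
  exact fun y hy => PySem.List.min?_isMin (key := fun r => r) hm y hy

theorem quest3Canon_isRotated (s : List Char) : s ~r quest3Canon s := by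
  unfold quest3Canon
  rcases eq_or_ne s [] with rfl | hs
  · simp
  · rw [if_neg hs]
    rcases hm : PySem.List.min? (quest3Rots s) (fun r => r) with _ | m
    · exact absurd ((PySem.List.min?_eq_none_iff _ _).mp hm) (quest3Rots_ne_nil s hs)
    · exact (mem_quest3Rots s m hs).mp (PySem.List.min?_mem hm)

theorem quest3Canon_eq_of_isRotated {s t : List Char} (h : s ~r t) :
    quest3Canon s = quest3Canon t := by
  rcases eq_or_ne s [] with rfl | hs
  · rw [h.perm.symm.eq_nil]
  · have ht : t ≠ [] := fun hteq => hs ((hteq ▸ h).perm.eq_nil)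
    rcases hm1 : PySem.List.min? (quest3Rots s) (fun r => r) with _ | m1
    · exact absurd ((PySem.List.min?_eq_none_iff _ _).mp hm1) (quest3Rots_ne_nil s hs)
    rcases hm2 : PySem.List.min? (quest3Rots t) (fun r => r) with _ | m2
    · exact absurd ((PySem.List.min?_eq_none_iff _ _).mp hm2) (quest3Rots_ne_nil t ht)
    have hm1s : s ~r m1 := (mem_quest3Rots s m1 hs).mp (PySem.List.min?_mem hm1)
    have hm2t : t ~r m2 := (mem_quest3Rots t m2 ht).mp (PySem.List.min?_mem hm2)
    have h12 : m1 ≤ m2 :=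
      quest3_min?_isMin _ _ hm1 m2 ((mem_quest3Rots s m2 hs).mpr (h.trans hm2t))
    have h21 : m2 ≤ m1 :=
      quest3_min?_isMin _ _ hm2 m1 ((mem_quest3Rots t m1 ht).mpr (h.symm.trans hm1s))
    unfold quest3Canon
    rw [if_neg hs, if_neg ht, hm1, hm2]
    simp [le_antisymm h12 h21]

theorem quest3Canon_eq_iff (s t : List Char) :
    quest3Canon s = quest3Canon t ↔ s ~r t := by
  constructor
  · intro h
    exact (quest3Canon_isRotated s).trans (h ▸ (quest3Canon_isRotated t).symm)
  · exact quest3Canon_eq_of_isRotated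

theorem quest3Inner_eq_filter (w dw : List Char) (l : List (List Char)) :
    quest3Inner w dw l =
      l.filter (fun y => !(decide (w.length = y.length) && PySem.Chars.isIn y dw)) := by
  induction l with
  | nil => rfl
  | cons y ys ih =>
      simp only [quest3Inner, List.filter_cons, ih]
      by_cases h : w.length = y.length ∧ PySem.Chars.isIn y dw = true
      · simp [h.1, h.2]
      · rw [if_neg h]
        rcases Decidable.not_and_iff_not_or_not.mp h with h1 | h1 <;> simp [h1]

theorem quest3Outer_eq_card (l : List (List Char)) :
    quest3Outer l = ((l.map quest3Canon).toFinset).card := by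
  induction l using quest3Outer.induct with
  | case1 => simp [quest3Outer]
  | case2 x xs ih =>
      rw [quest3Outer, ih, quest3Inner_eq_filter]
      have hf : xs.filter (fun y => !(decide (x.length = y.length) && PySem.Chars.isIn y (x ++ x)))
          = xs.filter (fun y => decide (quest3Canon y ≠ quest3Canon x)) := by
        apply List.filter_congr
        intro y _
        by_cases h : x ~r y
        · have h1 := (quest3_cond_iff_isRotated x y).mpr h
          have h2 : quest3Canon y = quest3Canon x := quest3Canon_eq_of_isRotated h.symm
          simp [h1.1, h1.2, h2]
        · have h2 : quest3Canon y ≠ quest3Canon x := by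
            intro he
            exact h (((quest3Canon_eq_iff y x).mp he).symm)
          rcases Decidable.not_and_iff_not_or_not.mp
            ((quest3_cond_iff_isRotated x y).not.mpr h) with h1 | h1 <;> simp [h1, h2]
      have hcomp : (fun y => decide (quest3Canon y ≠ quest3Canon x))
          = ((fun c => decide (c ≠ quest3Canon x)) ∘ quest3Canon) := rfl
      rw [hf, hcomp, ← List.filter_map, List.map_cons, List.toFinset_cons, List.toFinset_filter]
      have he : {c ∈ (List.map quest3Canon xs).toFinset | decide (c ≠ quest3Canon x) = true}
          = (List.map quest3Canon xs).toFinset.erase (quest3Canon x) := by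
        apply Finset.ext
        intro a
        simp [Finset.mem_erase, and_comm]
      rw [he]
      by_cases hc : quest3Canon x ∈ (List.map quest3Canon xs).toFinset
      · rw [Finset.insert_eq_self.mpr hc]
        have := Finset.card_erase_add_one hc
        omega
      · rw [Finset.erase_eq_of_notMem hc, Finset.card_insert_of_notMem hc]
        omega

theorem quest3_ofList_length_eq_card (l : List (List Char)) :
    (PySem.Set.ofList l).length = l.toFinset.card := by
  rw [← List.toFinset_card_of_nodup (PySem.Set.nodup_ofList l)]
  congr 1
  apply Finset.ext
  intro a
  simp [PySem.Set.mem_ofList]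

-- ===== VERDICT (by name: the statement is the Claim_ definition above) =====
theorem quest3_spec : Claim_equal_quest3 := by
  intro word _
  unfold Spec_quest3 quest3 quest3_alt
  rw [quest3Outer_eq_card, quest3_ofList_length_eq_card, List.map_map]
  rfl
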